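-- pv_equiv track=rewrite | github.com/MrBrantCode/unitest_baseline | mut_generate/mist_train_taco/taco_17939/solution.py | maximize_substring_occurrences
-- ===== SOURCE A (Python) =====
-- from collections import Counter
--
-- def maximize_substring_occurrences(s: str, t: str) -> str:
--     def prefixsuffixmatch(s):
--         pi_table = [0] * len(s)
--         for i in range(1, len(s)):
--             y = pi_table[i - 1]
--             while s[i] != s[y] and y != 0:
--                 y = pi_table[y - 1]
--             if s[i] == s[y]:
--                 y += 1
--             pi_table[i] = y
--         return pi_table
--
--     def fillit(x):
--         if '0' not in x:
--             x['0'] = 0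
--         if '1' not in x:
--             x['1'] = 0
--         return x
--
--     counter_s = fillit(Counter(s))
--     counter_t = fillit(Counter(t))
--     t_pi_table = prefixsuffixmatch(t)
--     longest_match = t_pi_table[-1]
--     repeating_part = t[longest_match:]
--     counter_repeating_part = fillit(Counter(repeating_part))
--
--     result = []
--
--     if counter_s['0'] >= counter_t['0'] and counter_s['1'] >= counter_t['1']:
--         result.append(t)
--         counter_s['0'] -= counter_t['0']
--         counter_s['1'] -= counter_t['1']
--
--     if '0' in counter_repeating_part and '1' in counter_repeating_part:
--         if counter_repeating_part['0'] > 0 and counter_repeating_part['1'] > 0: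
--             r = min(counter_s['0'] // counter_repeating_part['0'], counter_s['1'] // counter_repeating_part['1'])
--             result.append(repeating_part * r)
--             counter_s['0'] -= r * counter_repeating_part['0']
--             counter_s['1'] -= r * counter_repeating_part['1']
--
--     result.append('0' * counter_s['0'])
--     result.append('1' * counter_s['1'])
--
--     return ''.join(result)
-- ===== SOURCE B (Python) =====
-- def maximize_substring_occurrences(s: str, t: str) -> str:
--     n0, n1 = s.count('0'), s.count('1')
--     n = len(t)
--     # longest proper border of t by direct prefix/suffix comparison
--     k = 0
--     for i in range(1, n):
--         if t[:i] == t[n - i:]: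
--             k = i
--     rep = t[k:]
--     parts = []
--     t0, t1 = t.count('0'), t.count('1')
--     if n0 >= t0 and n1 >= t1:
--         parts.append(t)
--         n0 -= t0
--         n1 -= t1
--     r0, r1 = rep.count('0'), rep.count('1')
--     if r0 > 0 and r1 > 0:
--         q = min(n0 // r0, n1 // r1)
--         parts.append(rep * q)
--         n0 -= q * r0
--         n1 -= q * r1
--     return ''.join(parts) + '0' * n0 + '1' * n1
-- ===== Notes on version B (the rewrite author's own statement) =====
-- stated objective: simpler
-- what changed: Replaces the inner KMP prefix-function table with a direct longest-border scan (largest k with t[:k]==t[-k:]) and replaces the Counter/fillit dictionaries with plain str.count arithmetic on two integer variables.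
import Mathlib
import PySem

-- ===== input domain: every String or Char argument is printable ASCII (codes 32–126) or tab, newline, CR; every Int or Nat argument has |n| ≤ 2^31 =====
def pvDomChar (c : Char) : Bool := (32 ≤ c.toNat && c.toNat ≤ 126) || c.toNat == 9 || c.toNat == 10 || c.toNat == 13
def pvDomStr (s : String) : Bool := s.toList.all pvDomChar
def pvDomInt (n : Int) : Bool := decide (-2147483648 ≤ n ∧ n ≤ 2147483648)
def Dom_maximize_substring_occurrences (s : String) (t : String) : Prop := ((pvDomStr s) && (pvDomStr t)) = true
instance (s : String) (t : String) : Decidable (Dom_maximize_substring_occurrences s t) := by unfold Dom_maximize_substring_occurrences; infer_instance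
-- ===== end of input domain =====

-- B replaces A's inner KMP prefix-function table by a direct longest-border scan and the
-- Counter/fillit dictionaries by plain character counts (objective: simpler; same return value).

-- ===== PORT A =====
-- while s[i] != s[y] and y != 0: y = pi_table[y - 1]
-- (fuel merely makes the loop total; y strictly decreases on reachable states, so fuel = len(s) is never exhausted)
def pvKmpWhile (l : List Char) (tab : List Nat) (c : Char) : Nat → Nat → Nat
  | 0, y => y
  | fuel + 1, y =>
    if c ≠ l.getD y ' ' ∧ y ≠ 0 then pvKmpWhile l tab c fuel (tab.getD (y - 1) 0) else y

-- for i in range(1, len(s)): … ; pi_table[i] = y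
def pvKmpGo (l : List Char) (tab : List Nat) (i : Nat) : List Nat :=
  if i < l.length then
    let y0 := pvKmpWhile l tab (l.getD i ' ') l.length (tab.getD (i - 1) 0)
    let y1 := if l.getD i ' ' = l.getD y0 ' ' then y0 + 1 else y0
    pvKmpGo l (tab.set i y1) (i + 1)
  else tab
termination_by l.length - i

-- pi_table = [0] * len(s); loop from i = 1
def pvPrefixSuffixMatch (l : List Char) : List Nat :=
  pvKmpGo l (List.replicate l.length 0) 1

-- def fillit(x): insert missing '0'/'1' keys with value 0
def pvFillit (x : PySem.Dict Char Int) : PySem.Dict Char Int :=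
  let x1 := if x.contains '0' then x else x.insert '0' 0
  if x1.contains '1' then x1 else x1.insert '1' 0

def maximize_substring_occurrences (s : String) (t : String) : String :=
  let counter_s := pvFillit (PySem.Dict.counter s.toList)
  let counter_t := pvFillit (PySem.Dict.counter t.toList)
  let t_pi_table := pvPrefixSuffixMatch t.toList
  -- t_pi_table[-1] raises IndexError when t = "" (excluded by Pre_); the .getD 0 is unreachable there
  let longest := (PySem.List.pyGet? t_pi_table (-1)).getD 0
  let repeating := PySem.List.slice t.toList (some (longest : Int)) none
  let counter_rep := pvFillit (PySem.Dict.counter repeating)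
  let result : List (List Char) := []
  let rc1 :=
    if counter_s.getD '0' 0 ≥ counter_t.getD '0' 0 ∧ counter_s.getD '1' 0 ≥ counter_t.getD '1' 0 then
      let cs' := counter_s.insert '0' (counter_s.getD '0' 0 - counter_t.getD '0' 0)
      (result ++ [t.toList], cs'.insert '1' (cs'.getD '1' 0 - counter_t.getD '1' 0))
    else (result, counter_s)
  let result := rc1.1
  let counter_s := rc1.2
  let rc2 :=
    if counter_rep.contains '0' ∧ counter_rep.contains '1' then
      if 0 < counter_rep.getD '0' 0 ∧ 0 < counter_rep.getD '1' 0 then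
        let r := min (PySem.Int.floordiv (counter_s.getD '0' 0) (counter_rep.getD '0' 0))
                     (PySem.Int.floordiv (counter_s.getD '1' 0) (counter_rep.getD '1' 0))
        let cs' := counter_s.insert '0' (counter_s.getD '0' 0 - r * counter_rep.getD '0' 0)
        (result ++ [PySem.List.pyRepeat repeating r],
          cs'.insert '1' (cs'.getD '1' 0 - r * counter_rep.getD '1' 0))
      else (result, counter_s)
    else (result, counter_s)
  let result := rc2.1
  let counter_s := rc2.2
  let result := result ++ [PySem.List.pyRepeat ['0'] (counter_s.getD '0' 0)]
  let result := result ++ [PySem.List.pyRepeat ['1'] (counter_s.getD '1' 0)]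
  String.ofList result.flatten

-- ===== PORT B =====
def maximize_substring_occurrences_alt (s : String) (t : String) : String :=
  let n0 := s.toList.count '0'
  let n1 := s.toList.count '1'
  let tl := t.toList
  let n := tl.length
  -- for i in range(1, n): range(1, n) is List.range' 1 (n - 1); t[:i] / t[n-i:] with 0 ≤ i ≤ n are take/drop
  let k := (List.range' 1 (n - 1)).foldl (fun k i => if tl.take i = tl.drop (n - i) then i else k) 0
  let rep := tl.drop k
  let parts : List (List Char) := []
  let t0 := tl.count '0'
  let t1 := tl.count '1'
  -- all counts are nonnegative ints in Python, so they are Nat here and '//' is Nat division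
  let st1 := if t0 ≤ n0 ∧ t1 ≤ n1 then (parts ++ [tl], n0 - t0, n1 - t1) else (parts, n0, n1)
  let r0 := rep.count '0'
  let r1 := rep.count '1'
  let st2 :=
    if 0 < r0 ∧ 0 < r1 then
      let q := min (st1.2.1 / r0) (st1.2.2 / r1)
      (st1.1 ++ [PySem.List.pyRepeat rep (q : Int)], st1.2.1 - q * r0, st1.2.2 - q * r1)
    else st1
  String.ofList (st2.1.flatten ++ List.replicate st2.2.1 '0' ++ List.replicate st2.2.2 '1')

-- ===== PRECONDITION & SPEC =====
-- Pre_ excludes exactly t = "", where the Python A raises IndexError (t_pi_table[-1] on an empty table).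
def Pre_maximize_substring_occurrences (s : String) (t : String) : Prop := t ≠ ""
instance (s : String) (t : String) : Decidable (Pre_maximize_substring_occurrences s t) := by
  unfold Pre_maximize_substring_occurrences; infer_instance
def pvWitness_maximize_substring_occurrences : String × String := ("0101", "01")

def Spec_maximize_substring_occurrences (s : String) (t : String) (out : String) : Prop :=
  out = maximize_substring_occurrences_alt s t
instance (s : String) (t : String) (out : String) : Decidable (Spec_maximize_substring_occurrences s t out) := by
  unfold Spec_maximize_substring_occurrences; infer_instance

-- ===== CLAIM (what is proved, stated in full; the proofs are below) =====
def Claim_equal_maximize_substring_occurrences : Prop :=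
  ∀ (s : String) (t : String), Dom_maximize_substring_occurrences s t →
    Pre_maximize_substring_occurrences s t →
    Spec_maximize_substring_occurrences s t (maximize_substring_occurrences s t)

-- ===== LEMMAS AND PROOFS =====

-- k is a (proper) border of l: l.take k is also a suffix of l
abbrev pvBrd (l : List Char) (k : Nat) : Prop := k < l.length ∧ l.take k <:+ l

-- the longest proper border length
def pvLb (l : List Char) : Nat := Nat.findGreatest (fun k => pvBrd l k) (l.length - 1)

theorem pvBrd_zero {l : List Char} (h : l ≠ []) : pvBrd l 0 :=
  ⟨List.length_pos_of_ne_nil h, by simp⟩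

theorem pvLb_brd {l : List Char} (h : l ≠ []) : pvBrd l (pvLb l) :=
  Nat.findGreatest_spec (Nat.zero_le _) (pvBrd_zero h)

theorem pvLb_ge {l : List Char} {k : Nat} (h : pvBrd l k) : k ≤ pvLb l := by
  by_contra hlt
  exact Nat.findGreatest_is_greatest (Nat.lt_of_not_le hlt) (by have := h.1; omega) h

theorem pvLb_eq {l : List Char} {m : Nat} (h1 : pvBrd l m) (h2 : ∀ k, pvBrd l k → k ≤ m) :
    pvLb l = m := by
  have hne : l ≠ [] := by
    intro he; rw [he] at h1; exact absurd h1.1 (by simp)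
  exact le_antisymm (h2 _ (pvLb_brd hne)) (pvLb_ge h1)

theorem pvBrd_append {l : List Char} {c : Char} {m : Nat} :
    pvBrd (l ++ [c]) (m + 1) ↔ pvBrd l m ∧ l.getD m ' ' = c := by
  constructor
  · rintro ⟨hlt, hsuf⟩
    have hm : m < l.length := by simp at hlt; omega
    have htake : (l ++ [c]).take (m + 1) = l.take m ++ [l[m]] := by
      rw [List.take_append_of_le_length (by omega), List.take_succ]
      simp [List.getElem?_eq_getElem hm]
    rw [htake, List.suffix_concat_iff] at hsuf
    rcases hsuf with h | ⟨u, hu, hsu⟩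
    · have hl := congrArg List.length h
      simp at hl
      subst hl
      simp at hm
    · have := List.append_inj' hu rfl
      obtain ⟨h1, h2⟩ := this
      have hc : l[m] = c := by simpa using h2
      refine ⟨⟨hm, by rw [h1]; exact hsu⟩, ?_⟩
      rw [List.getD_eq_getElem l ' ' hm, hc]
  · rintro ⟨⟨hm, hsuf⟩, hc⟩
    refine ⟨by simp; omega, ?_⟩
    have hcm : l[m] = c := by rw [← hc, List.getD_eq_getElem l ' ' hm]
    have htake : (l ++ [c]).take (m + 1) = l.take m ++ [c] := by
      rw [List.take_append_of_le_length (by omega), List.take_succ,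
        List.getElem?_eq_getElem hm]
      simp [hcm]
    rw [htake]
    obtain ⟨w, hw⟩ := hsuf
    exact ⟨w, by rw [← List.append_assoc, hw]⟩

theorem pvBrd_of_brd_lt {l : List Char} {y k : Nat} (hy : pvBrd l y) (hk : pvBrd l k)
    (hlt : k < y) : pvBrd (l.take y) k := by
  have hyl : y < l.length := hy.1
  have hkl : k < l.length := hk.1
  refine ⟨by simp; omega, ?_⟩
  have hsub : l.take k <:+ l.take y := by
    rcases List.suffix_or_suffix_of_suffix hk.2 hy.2 with h | h
    · exact h
    · have := h.length_le
      simp [List.length_take] at this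
      omega
  rw [List.take_take]
  simpa [Nat.min_eq_left (le_of_lt hlt)] using hsub

theorem pvBrd_chain {l : List Char} {y k : Nat} (hy : pvBrd l y) (hk : pvBrd (l.take y) k) :
    pvBrd l k := by
  have hyl : y < l.length := hy.1
  have hkl : k < y := by
    have := hk.1; simp [List.length_take] at this; omega
  refine ⟨by omega, ?_⟩
  have : (l.take y).take k = l.take k := by
    rw [List.take_take]; simp [Nat.min_eq_left (le_of_lt hkl)]
  exact (this ▸ hk.2).trans hy.2

theorem pvGetD_take {l : List Char} {i r : Nat} (hr : r < i) (hi : i ≤ l.length) :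
    (l.take i).getD r ' ' = l.getD r ' ' := by
  have h1 : r < (l.take i).length := by simp [List.length_take]; omega
  rw [List.getD_eq_getElem _ ' ' h1, List.getD_eq_getElem _ ' ' (by omega), List.getElem_take]

-- ---- the while-loop specification ----
theorem pvKmpWhile_spec (l : List Char) (tab : List Nat) (c : Char) (i : Nat) (hi : i ≤ l.length)
    (htab : ∀ m, 1 ≤ m → m < i → tab.getD (m - 1) 0 = pvLb (l.take m)) :
    ∀ fuel y, pvBrd (l.take i) y → y < fuel →
      (∀ k, pvBrd (l.take i) k → c = l.getD k ' ' → k ≤ y) →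
      pvBrd (l.take i) (pvKmpWhile l tab c fuel y) ∧
      (∀ k, pvBrd (l.take i) k → c = l.getD k ' ' → k ≤ pvKmpWhile l tab c fuel y) ∧
      (c = l.getD (pvKmpWhile l tab c fuel y) ' ' ∨ pvKmpWhile l tab c fuel y = 0) := by
  intro fuel
  induction fuel with
  | zero => intro y _ hlt _; omega
  | succ f ih =>
    intro y hy hlt hpc
    simp only [pvKmpWhile]
    split_ifs with hcond
    · obtain ⟨hne, hy0⟩ := hcond
      have hil : (l.take i).length = i := by rw [List.length_take]; omega
      have hyi : y < i := by have := hy.1; rwa [hil] at this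
      have hy1 : 1 ≤ y := Nat.one_le_iff_ne_zero.mpr hy0
      have htv : tab.getD (y - 1) 0 = pvLb (l.take y) := htab y hy1 hyi
      have hty : l.take y ≠ [] := by
        apply List.ne_nil_of_length_pos
        rw [List.length_take]
        omega
      have hbrd' : pvBrd (l.take y) (pvLb (l.take y)) := pvLb_brd hty
      have hti : (l.take i).take y = l.take y := by
        rw [List.take_take, Nat.min_eq_left (le_of_lt hyi)]
      have hbrdS : pvBrd (l.take i) (tab.getD (y - 1) 0) := by
        rw [htv]
        exact pvBrd_chain hy (by rw [hti]; exact hbrd')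
      have hlby : pvLb (l.take y) < y := by
        have h' := hbrd'.1
        have h'' : (l.take y).length ≤ y := by
          rw [List.length_take]; omega
        omega
      have hlt' : tab.getD (y - 1) 0 < f := by rw [htv]; omega
      have hpc' : ∀ k, pvBrd (l.take i) k → c = l.getD k ' ' → k ≤ tab.getD (y - 1) 0 := by
        intro k hk hck
        have hky : k ≤ y := hpc k hk hck
        have hkny : k ≠ y := fun h => hne (by rw [← h]; exact hck)
        have hklt : k < y := lt_of_le_of_ne hky hkny
        have hk2 : pvBrd ((l.take i).take y) k := pvBrd_of_brd_lt hy hk hklt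
        rw [hti] at hk2
        rw [htv]
        exact pvLb_ge hk2
      exact ih (tab.getD (y - 1) 0) hbrdS hlt' hpc'
    · refine ⟨hy, hpc, ?_⟩
      by_cases hc : c = l.getD y ' '
      · exact Or.inl hc
      · right
        by_contra h0
        exact hcond ⟨hc, h0⟩

-- ---- one step of the table loop computes the next longest border ----
theorem pvKmp_step (l : List Char) (tab : List Nat) (i : Nat) (h1 : 1 ≤ i) (hi : i < l.length)
    (hinv : ∀ j, j < i → tab.getD j 0 = pvLb (l.take (j + 1))) :
    (let y0 := pvKmpWhile l tab (l.getD i ' ') l.length (tab.getD (i - 1) 0)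
     if l.getD i ' ' = l.getD y0 ' ' then y0 + 1 else y0) = pvLb (l.take (i + 1)) := by
  have hile : i ≤ l.length := le_of_lt hi
  have hil : (l.take i).length = i := by rw [List.length_take]; omega
  have hne : l.take i ≠ [] := by
    intro h; have := congrArg List.length h; rw [hil] at this; simp at this; omega
  have hy0v : tab.getD (i - 1) 0 = pvLb (l.take i) := by
    have := hinv (i - 1) (by omega)
    rwa [Nat.sub_add_cancel h1] at this
  have hy0brd : pvBrd (l.take i) (tab.getD (i - 1) 0) := by
    rw [hy0v]; exact pvLb_brd hne
  have hy0lt : tab.getD (i - 1) 0 < l.length := by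
    have := hy0brd.1; rw [hil] at this; omega
  have hpc0 : ∀ k, pvBrd (l.take i) k → l.getD i ' ' = l.getD k ' ' → k ≤ tab.getD (i - 1) 0 := by
    intro k hk _
    rw [hy0v]
    exact pvLb_ge hk
  have htab' : ∀ m, 1 ≤ m → m < i → tab.getD (m - 1) 0 = pvLb (l.take m) := by
    intro m hm1 hmi
    have := hinv (m - 1) (by omega)
    rwa [Nat.sub_add_cancel hm1] at this
  obtain ⟨hrb, hrpc, hrexit⟩ :=
    pvKmpWhile_spec l tab (l.getD i ' ') i hile htab' l.length (tab.getD (i - 1) 0)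
      hy0brd hy0lt hpc0
  set r := pvKmpWhile l tab (l.getD i ' ') l.length (tab.getD (i - 1) 0) with hr
  have hri : r < i := by have := hrb.1; rwa [hil] at this
  have htake1 : l.take (i + 1) = l.take i ++ [l[i]] := by
    rw [List.take_succ, List.getElem?_eq_getElem hi]; rfl
  have hci : l.getD i ' ' = l[i] := List.getD_eq_getElem l ' ' hi
  simp only []
  split_ifs with hmatch
  · -- match: longest border is r + 1
    rw [htake1]
    refine (pvLb_eq ?_ ?_).symm
    · rw [pvBrd_append]
      refine ⟨hrb, ?_⟩
      rw [pvGetD_take hri hile, ← hmatch, hci]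
    · intro k hk
      match k with
      | 0 => omega
      | m + 1 =>
        rw [pvBrd_append] at hk
        obtain ⟨hbm, hcm⟩ := hk
        have hmi : m < i := by have := hbm.1; rwa [hil] at this
        have : m ≤ r := by
          apply hrpc m hbm
          rw [pvGetD_take hmi hile] at hcm
          rw [hcm, hci]
        omega
  · -- mismatch: r = 0 and there is no matching border
    have hr0 : r = 0 := by
      rcases hrexit with h | h
      · exact absurd h hmatch
      · exact h
    rw [htake1, hr0]
    refine (pvLb_eq ?_ ?_).symm
    · exact pvBrd_zero (List.append_ne_nil_of_right_ne_nil _ (by simp))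
    · intro k hk
      match k with
      | 0 => omega
      | m + 1 =>
        rw [pvBrd_append] at hk
        obtain ⟨hbm, hcm⟩ := hk
        have hmi : m < i := by have := hbm.1; rwa [hil] at this
        have hm0 : m = 0 := by
          have := hrpc m hbm (by rw [pvGetD_take hmi hile] at hcm; rw [hcm, hci])
          omega
        subst hm0
        exfalso
        apply hmatch
        rw [hr0, ← pvGetD_take (show (0:Nat) < i by omega) hile, hcm, hci]

theorem pvKmpGo_length (l : List Char) : ∀ i tab, (pvKmpGo l tab i).length = tab.length := by
  have key : ∀ n i tab, l.length - i ≤ n → (pvKmpGo l tab i).length = tab.length := by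
    intro n
    induction n with
    | zero =>
      intro i tab h
      rw [pvKmpGo, if_neg (by omega)]
    | succ n ih =>
      intro i tab h
      rw [pvKmpGo]
      split_ifs with hlt
      · rw [ih (i + 1) _ (by omega)]
        simp
      · rfl
  exact fun i tab => key (l.length - i) i tab le_rfl

theorem pvKmpGo_spec (l : List Char) : ∀ i tab, 1 ≤ i → tab.length = l.length →
    (∀ j, j < i → tab.getD j 0 = pvLb (l.take (j + 1))) →
    ∀ j, j < l.length → (pvKmpGo l tab i).getD j 0 = pvLb (l.take (j + 1)) := by
  have key : ∀ n i tab, l.length - i ≤ n → 1 ≤ i → tab.length = l.length →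
      (∀ j, j < i → tab.getD j 0 = pvLb (l.take (j + 1))) →
      ∀ j, j < l.length → (pvKmpGo l tab i).getD j 0 = pvLb (l.take (j + 1)) := by
    intro n
    induction n with
    | zero =>
      intro i tab h h1 _ hinv j hj
      rw [pvKmpGo, if_neg (by omega)]
      exact hinv j (by omega)
    | succ n ih =>
      intro i tab h h1 hlen hinv j hj
      rw [pvKmpGo]
      split_ifs with hlt
      · refine ih (i + 1) _ (by omega) (by omega) (by simp [hlen]) ?_ j hj
        intro j' hj'
        have hstep := pvKmp_step l tab i h1 hlt hinv
        simp only [] at hstep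
        rcases Nat.lt_or_ge j' i with hji | hji
        · have hset : ∀ v : Nat, (tab.set i v).getD j' 0 = tab.getD j' 0 := by
            intro v
            unfold List.getD
            rw [List.getElem?_set_ne (by omega)]
          rw [hset]
          exact hinv j' hji
        · have hji' : j' = i := by omega
          subst hji'
          have hset : ∀ v : Nat, (tab.set j' v).getD j' 0 = v := by
            intro v
            unfold List.getD
            rw [List.getElem?_set_self (by omega), Option.getD_some]
          rw [hset]
          exact hstep
      · exact hinv j (by omega)
  exact fun i tab => key (l.length - i) i tab le_rfl

theorem pvPiTable_last {l : List Char} (h : l ≠ []) :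
    (PySem.List.pyGet? (pvPrefixSuffixMatch l) (-1)).getD 0 = pvLb l := by
  have hpos : 0 < l.length := List.length_pos_of_ne_nil h
  have hlen : (pvPrefixSuffixMatch l).length = l.length := by
    unfold pvPrefixSuffixMatch
    rw [pvKmpGo_length, List.length_replicate]
  have hspec : ∀ j, j < l.length →
      (pvPrefixSuffixMatch l).getD j 0 = pvLb (l.take (j + 1)) := by
    unfold pvPrefixSuffixMatch
    apply pvKmpGo_spec l 1 _ le_rfl (by simp)
    intro j hj
    have hj0 : j = 0 := by omega
    subst hj0
    rw [List.getD_replicate _ hpos]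
    have hone : pvLb (l.take 1) = 0 := by
      apply pvLb_eq (pvBrd_zero ?_)
      · intro k hk
        have := hk.1
        rw [List.length_take] at this
        omega
      · apply List.ne_nil_of_length_pos
        rw [List.length_take]
        omega
    simpa using hone.symm
  rw [PySem.List.pyGet?_neg_one, List.getLast?_eq_getElem?, hlen]
  have := hspec (l.length - 1) (by omega)
  unfold List.getD at this
  rw [this]
  congr 1
  rw [Nat.sub_add_cancel hpos, List.take_length]

-- ---- B's scan computes the same longest border ----
theorem pvFoldl_findGreatest (p : Nat → Prop) [DecidablePred p] (m : Nat) :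
    (List.range' 1 m).foldl (fun k i => if p i then i else k) 0 = Nat.findGreatest p m := by
  induction m with
  | zero => simp
  | succ n ih =>
    rw [List.range'_concat, List.foldl_append, ih, Nat.findGreatest_succ]
    simp [Nat.add_comm 1 n]

theorem pvFindGreatest_congr (p q : Nat → Prop) [DecidablePred p] [DecidablePred q] (b : Nat)
    (h : ∀ k, k ≤ b → (p k ↔ q k)) : Nat.findGreatest p b = Nat.findGreatest q b := by
  induction b with
  | zero => rfl
  | succ n ih =>
    rw [Nat.findGreatest_succ, Nat.findGreatest_succ,
      ih (fun k hk => h k (by omega))]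
    by_cases hp : p (n + 1)
    · rw [if_pos hp, if_pos ((h (n + 1) le_rfl).mp hp)]
    · rw [if_neg hp, if_neg (fun hq => hp ((h (n + 1) le_rfl).mpr hq))]

theorem pvScan_eq_lb (l : List Char) :
    (List.range' 1 (l.length - 1)).foldl
      (fun k i => if l.take i = l.drop (l.length - i) then i else k) 0 = pvLb l := by
  rw [pvFoldl_findGreatest]
  unfold pvLb
  rcases Nat.eq_zero_or_pos l.length with hz | hpos
  · simp [hz]
  apply pvFindGreatest_congr
  intro k hk
  constructor
  · intro he
    refine ⟨by omega, ?_⟩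
    rw [List.suffix_iff_eq_drop, List.length_take, Nat.min_eq_left (by omega)]
    exact he
  · rintro ⟨hlt, hsuf⟩
    rw [List.suffix_iff_eq_drop, List.length_take, Nat.min_eq_left (by omega)] at hsuf
    exact hsuf

-- ---- counters reduce to counts ----
theorem pvFillit_getD (xs : List Char) (c : Char) :
    (pvFillit (PySem.Dict.counter xs)).getD c 0 = (xs.count c : Int) := by
  unfold pvFillit
  by_cases h0 : '0' ∈ xs <;> by_cases h1 : '1' ∈ xs <;>
    simp [PySem.Dict.contains_counter, h0, h1, PySem.Dict.contains_insert,
      PySem.Dict.getD_insert, PySem.Dict.getD_counter] <;>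
    (try split_ifs) <;> (try intro hc) <;> subst_vars <;>
    first
      | rfl
      | exact_mod_cast (List.count_eq_zero.mpr h0).symm
      | exact_mod_cast (List.count_eq_zero.mpr h1).symm

theorem pvFillit_contains_zero (xs : List Char) :
    (pvFillit (PySem.Dict.counter xs)).contains '0' = true := by
  unfold pvFillit
  by_cases h0 : '0' ∈ xs <;> by_cases h1 : '1' ∈ xs <;>
    simp [PySem.Dict.contains_counter, h0, h1, PySem.Dict.contains_insert]

theorem pvFillit_contains_one (xs : List Char) :
    (pvFillit (PySem.Dict.counter xs)).contains '1' = true := by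
  unfold pvFillit
  by_cases h0 : '0' ∈ xs <;> by_cases h1 : '1' ∈ xs <;>
    simp [PySem.Dict.contains_counter, h0, h1, PySem.Dict.contains_insert]

-- ---- main equivalence ----
theorem pvMain (s t : String) (h : t ≠ "") :
    maximize_substring_occurrences s t = maximize_substring_occurrences_alt s t := by
  have htl : t.toList ≠ [] := by
    intro hh
    apply h
    have := congrArg String.ofList hh
    simpa using this
  unfold maximize_substring_occurrences maximize_substring_occurrences_alt
  simp only [pvPiTable_last htl, PySem.List.slice_from_natCast, pvScan_eq_lb,
    pvFillit_getD, pvFillit_contains_zero, pvFillit_contains_one, ge_iff_le,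
    Nat.cast_le, Nat.cast_pos, and_self, if_true]
  by_cases hb1 : List.count '0' t.toList ≤ List.count '0' s.toList ∧
      List.count '1' t.toList ≤ List.count '1' s.toList <;>
    by_cases hb2 : '0' ∈ List.drop (pvLb t.toList) t.toList ∧
        '1' ∈ List.drop (pvLb t.toList) t.toList <;>
      simp [hb1, hb2, PySem.Dict.getD_insert, pvFillit_getD]
  · simp only [← Nat.cast_sub hb1.1, ← Nat.cast_sub hb1.2, ← Int.natCast_div, ← Nat.cast_min,
      ← Nat.cast_mul, Int.toNat_sub]
  · simp only [← Int.natCast_div, ← Nat.cast_min, ← Nat.cast_mul, Int.toNat_sub]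

-- ===== VERDICT (by name: the statement is the Claim_ definition above) =====
theorem maximize_substring_occurrences_spec : Claim_equal_maximize_substring_occurrences := by
  intro s t _ hpre
  unfold Spec_maximize_substring_occurrences
  exact pvMain s t hpre
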